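-- pv_equiv track=rewrite | github.com/joominchul/codingTestJoo | Lv.2 땅따먹기.py | solution
-- ===== SOURCE A (Python) =====
-- def solution(land):
--     answer = 0
--     for i in range(1, len(land)):
--         for j in range(4):
--             temp = land[i - 1].copy()
--             temp.pop(j)
--             land[i][j] += max(temp)
--
--     return max(land[len(land)-1])
-- ===== SOURCE B (Python) =====
-- def solution(land):
--     # same in-place mutation of land as the original; returns max(last row)
--     for i in range(1, len(land)):
--         prev = land[i - 1]
--         best, bi, second = prev[0], 0, None
--         for k, v in enumerate(prev[1:], 1):
--             if v > best:
--                 best, bi, second = v, k, best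
--             elif second is None or v > second:
--                 second = v
--         row = land[i]
--         for j in range(4):
--             row[j] += best if j != bi else second
--     return max(land[len(land) - 1])
-- ===== Notes on version B (the rewrite author's own statement) =====
-- stated objective: alternative
-- what changed: Replaces A's per-column copy/pop/rescan of the previous row (a fresh list copy and full max scan for each of the 4 columns) with a single top-2 scan per row (max value, its first index, and the max excluding that index), then adds best or second depending on the column; mutates land in place exactly as A does.
import Mathlib
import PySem

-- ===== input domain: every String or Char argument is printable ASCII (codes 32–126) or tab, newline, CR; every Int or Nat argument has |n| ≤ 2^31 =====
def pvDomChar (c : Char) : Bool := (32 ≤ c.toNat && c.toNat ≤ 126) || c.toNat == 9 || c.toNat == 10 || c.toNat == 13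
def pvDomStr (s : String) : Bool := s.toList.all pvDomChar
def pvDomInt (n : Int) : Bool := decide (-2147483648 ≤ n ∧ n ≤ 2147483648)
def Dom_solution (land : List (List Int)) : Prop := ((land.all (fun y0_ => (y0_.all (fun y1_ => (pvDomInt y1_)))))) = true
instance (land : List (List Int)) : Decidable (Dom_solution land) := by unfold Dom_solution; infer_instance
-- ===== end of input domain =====

-- B replaces A's per-column copy/pop/rescan of the previous row by one top-2 scan per row
-- (max, its first index, and the max excluding that index); same in-place mutation of land,
-- equivalence proved about the return value.

-- ===== PORT A =====
def solution (land : List (List Int)) : Int :=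
  let land' := (PySem.List.pyRange 1 (land.length : Int) 1).foldl
    (fun (L : List (List Int)) (i : Int) => (PySem.List.pyRange 0 4 1).foldl
      (fun (L : List (List Int)) (j : Int) =>
        let temp0 := PySem.List.pyGetD L (i - 1) []          -- temp = land[i-1].copy()
        match PySem.List.pop? temp0 j with                   -- temp.pop(j); none = IndexError (outside Pre_)
        | none => L
        | some (_, temp) =>
          match PySem.List.max? temp (fun x => x) with       -- max(temp); none = max([]) ValueError (outside Pre_)
          | none => L
          | some m =>
            let row := PySem.List.pyGetD L i []
            PySem.List.pySetD L i (PySem.List.pySetD row j (PySem.List.pyGetD row j 0 + m)))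
      L) land
  match PySem.List.max? (PySem.List.pyGetD land' ((land'.length : Int) - 1) []) (fun x => x) with
  | none => 0                                                -- max([]) raises ValueError (outside Pre_)
  | some m => m

-- ===== PORT B =====
-- loop body of B's top-2 scan: state (best, bi, second), next pair (k, v)
def top2step (s : Int × Int × Option Int) (kv : Int × Int) : Int × Int × Option Int :=
  if kv.2 > s.1 then (kv.2, kv.1, some s.1)
  else match s.2.2 with
    | none => (s.1, s.2.1, some kv.2)
    | some t => if kv.2 > t then (s.1, s.2.1, some kv.2) else (s.1, s.2.1, some t)

def solution_alt (land : List (List Int)) : Int :=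
  let land' := (PySem.List.pyRange 1 (land.length : Int) 1).foldl
    (fun (L : List (List Int)) (i : Int) =>
      match PySem.List.pyGetD L (i - 1) [] with
      | [] => L                                              -- prev[0] raises IndexError (outside Pre_)
      | p0 :: rest =>
        let s := (PySem.List.enumerate rest 1).foldl top2step (p0, 0, none)
        let row := PySem.List.pyGetD L i []
        let row' := (PySem.List.pyRange 0 4 1).foldl
          (fun (r : List Int) (j : Int) => PySem.List.pySetD r j (PySem.List.pyGetD r j 0 +
            (if j ≠ s.2.1 then s.1 else s.2.2.getD 0))) row  -- second = None here raises in Python (outside Pre_)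
        PySem.List.pySetD L i row') land
  match PySem.List.max? (PySem.List.pyGetD land' ((land'.length : Int) - 1) []) (fun x => x) with
  | none => 0
  | some m => m

-- ===== PRECONDITION & SPEC =====
-- Pre_ is exactly where Python A returns: a nonempty land whose single row is nonempty, or,
-- with at least two rows, every row of width ≥ 4 (otherwise pop(j)/land[i][j]/max raise).
def Pre_solution (land : List (List Int)) : Prop :=
  land ≠ [] ∧ (land.length = 1 → land.head? ≠ some []) ∧
    (2 ≤ land.length → ∀ row ∈ land, 4 ≤ row.length)
instance (land : List (List Int)) : Decidable (Pre_solution land) := by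
  unfold Pre_solution; infer_instance
def pvWitness_solution : List (List Int) := [[1, 2, 3, 4], [4, 3, 2, 1]]

def Spec_solution (land : List (List Int)) (out : Int) : Prop := out = solution_alt land
instance (land : List (List Int)) (out : Int) : Decidable (Spec_solution land out) := by
  unfold Spec_solution; infer_instance

-- ===== CLAIM (what is proved, stated in full; the proofs are below) =====
def Claim_equal_solution : Prop := ∀ (land : List (List Int)), Dom_solution land → Pre_solution land → Spec_solution land (solution land)

-- ===== LEMMAS AND PROOFS =====

-- A's inner-loop body, named for the proofs (definitionally the lambda in `solution`)
def fA (i : Int) (L : List (List Int)) (j : Int) : List (List Int) :=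
  let temp0 := PySem.List.pyGetD L (i - 1) []
  match PySem.List.pop? temp0 j with
  | none => L
  | some (_, temp) =>
    match PySem.List.max? temp (fun x => x) with
    | none => L
    | some m =>
      let row := PySem.List.pyGetD L i []
      PySem.List.pySetD L i (PySem.List.pySetD row j (PySem.List.pyGetD row j 0 + m))

def stepA (L : List (List Int)) (i : Int) : List (List Int) :=
  (PySem.List.pyRange 0 4 1).foldl (fA i) L

-- B's outer-loop body, named for the proofs (definitionally the lambda in `solution_alt`)
def stepB (L : List (List Int)) (i : Int) : List (List Int) :=
  match PySem.List.pyGetD L (i - 1) [] with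
  | [] => L
  | p0 :: rest =>
    let s := (PySem.List.enumerate rest 1).foldl top2step (p0, 0, none)
    let row := PySem.List.pyGetD L i []
    let row' := (PySem.List.pyRange 0 4 1).foldl
      (fun r j => PySem.List.pySetD r j (PySem.List.pyGetD r j 0 +
        (if j ≠ s.2.1 then s.1 else s.2.2.getD 0))) row
    PySem.List.pySetD L i row'

lemma solution_eq_stepA (land : List (List Int)) :
    solution land =
      (match PySem.List.max?
          (PySem.List.pyGetD ((PySem.List.pyRange 1 (land.length : Int) 1).foldl stepA land)
            (((((PySem.List.pyRange 1 (land.length : Int) 1).foldl stepA land)).length : Int) - 1) [])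
          (fun x => x) with
        | none => 0
        | some m => m) := rfl

lemma solution_alt_eq_stepB (land : List (List Int)) :
    solution_alt land =
      (match PySem.List.max?
          (PySem.List.pyGetD ((PySem.List.pyRange 1 (land.length : Int) 1).foldl stepB land)
            (((((PySem.List.pyRange 1 (land.length : Int) 1).foldl stepB land)).length : Int) - 1) [])
          (fun x => x) with
        | none => 0
        | some m => m) := rfl

lemma max?_id_eq_some {xs : List Int} {m : Int} (hm : m ∈ xs) (hle : ∀ y ∈ xs, y ≤ m) :
    PySem.List.max? xs (fun y => y) = some m := by
  rcases h : PySem.List.max? xs (fun y => y) with _ | m'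
  · rw [PySem.List.max?_eq_none_iff] at h; subst h; cases hm
  · have h1 : m' ∈ xs := PySem.List.max?_mem h
    have h2 : ∀ y ∈ xs, y ≤ m' := PySem.List.max?_isMax h
    exact congrArg some (le_antisymm (hle _ h1) (h2 _ hm))

-- invariant of B's top-2 scan
lemma top2_spec (p0 : Int) (rest : List Int) (b bi : Int) (sec : Option Int)
    (h : (PySem.List.enumerate rest 1).foldl top2step (p0, 0, none) = (b, bi, sec)) :
    (∀ y ∈ p0 :: rest, y ≤ b) ∧ 0 ≤ bi ∧ bi < ((p0 :: rest).length : Int) ∧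
      (p0 :: rest)[bi.toNat]? = some b ∧
      sec = PySem.List.max? ((p0 :: rest).eraseIdx bi.toNat) (fun y => y) := by
  induction rest using List.reverseRecOn generalizing b bi sec with
  | nil =>
    simp only [PySem.List.enumerate_nil, List.foldl_nil, Prod.mk.injEq] at h
    obtain ⟨hb, hbi, hsec⟩ := h
    subst hb; subst hbi; subst hsec
    refine ⟨by simp, by norm_num, by norm_num, by simp, ?_⟩
    have h0 : ([p0] : List Int).eraseIdx (0 : Int).toNat = [] := rfl
    rw [h0]; exact ((PySem.List.max?_eq_none_iff _ _).2 rfl).symm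
  | append_singleton t v ih =>
    rw [PySem.List.enumerate_append] at h
    simp only [List.foldl_append, PySem.List.enumerate_cons, PySem.List.enumerate_nil,
      List.foldl_cons, List.foldl_nil] at h
    rcases h0 : (PySem.List.enumerate t 1).foldl top2step (p0, 0, none) with ⟨b0, bi0, sec0⟩
    rw [h0] at h
    obtain ⟨ih1, ih2, ih3, ih4, ih5⟩ := ih b0 bi0 sec0 h0
    have hlen0 : (p0 :: t).length = t.length + 1 := by simp
    have hbin : bi0.toNat < (p0 :: t).length := by omega
    have hcons : p0 :: (t ++ [v]) = (p0 :: t) ++ [v] := rfl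
    rw [hcons]
    by_cases hv : v > b0
    · simp only [top2step, hv, if_pos] at h
      rw [Prod.mk.injEq, Prod.mk.injEq] at h; obtain ⟨hb, hbi, hsec⟩ := h
      subst hb; subst hbi; subst hsec
      have hk : ((1 : Int) + (t.length : Int)).toNat = (p0 :: t).length := by omega
      refine ⟨?_, by omega, ?_, ?_, ?_⟩
      · intro y hy
        rcases List.mem_append.1 hy with hy | hy
        · exact le_of_lt (lt_of_le_of_lt (ih1 y hy) hv)
        · simp at hy; omega
      · simp only [List.length_append, List.length_cons]; push_cast; omega
      · rw [hk]; exact List.getElem?_concat_length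
      · rw [hk, List.eraseIdx_append_of_length_le (le_refl _)]
        simp only [Nat.sub_self, List.eraseIdx_zero, List.tail_cons, List.append_nil]
        exact (max?_id_eq_some (List.mem_of_getElem? ih4) ih1).symm
    · have hvle : v ≤ b0 := not_lt.mp hv
      have hgE : ((p0 :: t) ++ [v])[bi0.toNat]? = some b0 := by
        rw [List.getElem?_append_left hbin]; exact ih4
      have hbnd : ∀ y ∈ (p0 :: t) ++ [v], y ≤ b0 := by
        intro y hy
        rcases List.mem_append.1 hy with hy | hy
        · exact ih1 y hy
        · simp at hy; omega
      have hEi : ((p0 :: t) ++ [v]).eraseIdx bi0.toNat =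
          (p0 :: t).eraseIdx bi0.toNat ++ [v] := List.eraseIdx_append_of_lt_length hbin _
      have hblt : bi0 < (((p0 :: t) ++ [v]).length : Int) := by
        simp only [List.length_append, List.length_cons]; push_cast; omega
      rcases sec0 with _ | tt
      · simp only [top2step, hv, if_false] at h
        rw [Prod.mk.injEq, Prod.mk.injEq] at h; obtain ⟨hb, hbi, hsec⟩ := h
        subst hb; subst hbi; subst hsec
        have hnil : (p0 :: t).eraseIdx bi0.toNat = [] :=
          (PySem.List.max?_eq_none_iff _ _).1 ih5.symm
        refine ⟨hbnd, ih2, hblt, hgE, ?_⟩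
        rw [hEi, hnil, List.nil_append]
        have := PySem.List.max?_id_cons v ([] : List Int)
        simp only [List.foldl_nil] at this
        exact this.symm
      · have htmem : tt ∈ (p0 :: t).eraseIdx bi0.toNat := PySem.List.max?_mem ih5.symm
        have htmax : ∀ y ∈ (p0 :: t).eraseIdx bi0.toNat, y ≤ tt :=
          PySem.List.max?_isMax ih5.symm
        by_cases hvt : v > tt
        · simp only [top2step, hv, if_false, hvt, if_pos] at h
          rw [Prod.mk.injEq, Prod.mk.injEq] at h; obtain ⟨hb, hbi, hsec⟩ := h
          subst hb; subst hbi; subst hsec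
          refine ⟨hbnd, ih2, hblt, hgE, ?_⟩
          rw [hEi]
          refine (max?_id_eq_some (by simp) ?_).symm
          intro y hy
          rcases List.mem_append.1 hy with hy | hy
          · exact le_of_lt (lt_of_le_of_lt (htmax y hy) hvt)
          · simp at hy; omega
        · simp only [top2step, hv, if_false, hvt] at h
          rw [Prod.mk.injEq, Prod.mk.injEq] at h; obtain ⟨hb, hbi, hsec⟩ := h
          subst hb; subst hbi; subst hsec
          refine ⟨hbnd, ih2, hblt, hgE, ?_⟩
          rw [hEi]
          refine (max?_id_eq_some (List.mem_append_left _ htmem) ?_).symm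
          intro y hy
          rcases List.mem_append.1 hy with hy | hy
          · exact htmax y hy
          · simp at hy; omega

-- the value A adds at column j equals the value B adds there
lemma addval (p0 : Int) (rest : List Int) (b bi : Int) (sec : Option Int)
    (h : (PySem.List.enumerate rest 1).foldl top2step (p0, 0, none) = (b, bi, sec))
    (hlen : 2 ≤ (p0 :: rest).length) (j : Nat) (hj : j < (p0 :: rest).length) :
    PySem.List.max? ((p0 :: rest).eraseIdx j) (fun y => y) =
      some (if (j : Int) ≠ bi then b else sec.getD 0) := by
  obtain ⟨h1, h2, h3, h4, h5⟩ := top2_spec p0 rest b bi sec h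
  by_cases hji : (j : Int) = bi
  · rw [if_neg (by simp [hji])]
    have hjn : bi.toNat = j := by omega
    rw [← hjn]
    rcases sec with _ | m
    · exfalso
      have hnil : (p0 :: rest).eraseIdx bi.toNat = [] :=
        (PySem.List.max?_eq_none_iff _ _).1 h5.symm
      have := congrArg List.length hnil
      rw [List.length_eraseIdx] at this
      simp only [if_pos (by omega : bi.toNat < (p0 :: rest).length)] at this
      have hrest : rest = [] := by simpa using this
      subst hrest; simp at hlen
    · simp only [Option.getD_some]
      exact h5.symm
  · rw [if_pos hji]
    have hbn : bi.toNat ≠ j := by omega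
    apply max?_id_eq_some
    · refine List.mem_of_getElem? (i := if bi.toNat < j then bi.toNat else bi.toNat - 1) ?_
      rw [List.getElem?_eraseIdx]
      by_cases hlt2 : bi.toNat < j
      · rw [if_pos hlt2, if_pos hlt2]; exact h4
      · rw [if_neg hlt2, if_neg (by omega)]
        have hix : bi.toNat - 1 + 1 = bi.toNat := by omega
        rw [hix]; exact h4
    · intro y hy; exact h1 y (List.mem_of_mem_eraseIdx hy)

lemma foldl_pySetD_length (f : List Int → Int → Int) (js : List Int) :
    ∀ r : List Int, (js.foldl (fun r j => PySem.List.pySetD r j (f r j)) r).length = r.length := by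
  induction js with
  | nil => intro r; rfl
  | cons j js ih => intro r; simp [List.foldl_cons, ih, PySem.List.length_pySetD]

-- A's inner loop, normalised: it only rewrites row i
lemma innerA_foldl (i : Int) (L : List (List Int)) (prev : List Int)
    (hi : 1 ≤ i) (hiL : i < (L.length : Int))
    (hprev : PySem.List.pyGetD L (i - 1) [] = prev) (hplen : 2 ≤ prev.length)
    (js : List Int) (hjs : ∀ j ∈ js, 0 ≤ j ∧ j < (prev.length : Int)) :
    ∀ r, js.foldl (fA i) (PySem.List.pySetD L i r) =
      PySem.List.pySetD L i (js.foldl (fun r j => PySem.List.pySetD r j (PySem.List.pyGetD r j 0 +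
        (PySem.List.max? (prev.eraseIdx j.toNat) (fun y => y)).getD 0)) r) := by
  revert hjs
  induction js with
  | nil => intro _ r; rfl
  | cons j js ih =>
    intro hjs r
    obtain ⟨hj0, hjlen⟩ := hjs j (by simp : j ∈ j :: js)
    have hset : PySem.List.pySetD L i r = L.set i.toNat r :=
      PySem.List.pySetD_of_nonneg _ _ (by omega)
    have hl2 : (((L.set i.toNat r)).length : Int) = (L.length : Int) := by simp
    have htemp : PySem.List.pyGetD (PySem.List.pySetD L i r) (i - 1) [] = prev := by
      rw [hset, PySem.List.pyGetD_eq_getElem _ _ (by omega) (by rw [hl2]; omega),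
        List.getElem_set_ne (by omega)]
      rw [← hprev, PySem.List.pyGetD_eq_getElem _ _ (by omega) (by omega)]
    have hjn : j.toNat < prev.length := by omega
    have hpop : PySem.List.pop? prev j = some (prev[j.toNat]'hjn, prev.eraseIdx j.toNat) := by
      conv_lhs => rw [(Int.toNat_of_nonneg hj0).symm]
      exact PySem.List.pop?_natCast prev j.toNat hjn
    have hrow : PySem.List.pyGetD (PySem.List.pySetD L i r) i [] = r := by
      rw [hset, PySem.List.pyGetD_eq_getElem _ _ (by omega) (by rw [hl2]; omega)]
      exact List.getElem_set_self (by simpa using (by omega : i.toNat < L.length))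
    rcases hm : PySem.List.max? (prev.eraseIdx j.toNat) (fun y => y) with _ | m
    · exfalso
      have hnil := (PySem.List.max?_eq_none_iff _ _).1 hm
      have hlth := congrArg List.length hnil
      rw [List.length_eraseIdx, if_pos hjn] at hlth
      simp at hlth; omega
    · have hstep : fA i (PySem.List.pySetD L i r) j =
          PySem.List.pySetD L i (PySem.List.pySetD r j (PySem.List.pyGetD r j 0 +
            (PySem.List.max? (prev.eraseIdx j.toNat) (fun y => y)).getD 0)) := by
        simp only [fA]
        rw [htemp, hpop]
        simp only [hm, hrow, Option.getD_some]
        rw [hset, PySem.List.pySetD_of_nonneg _ _ (by omega),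
          PySem.List.pySetD_of_nonneg L _ (by omega), List.set_set]
      simp only [List.foldl_cons, hstep]
      exact ih (fun j' hj' => hjs j' (List.mem_cons_of_mem _ hj')) _

lemma foldl_row_congr (w1 w2 : Int → Int) (js : List Int) (hw : ∀ j ∈ js, w1 j = w2 j) :
    ∀ r : List Int,
      js.foldl (fun r j => PySem.List.pySetD r j (PySem.List.pyGetD r j 0 + w1 j)) r =
      js.foldl (fun r j => PySem.List.pySetD r j (PySem.List.pyGetD r j 0 + w2 j)) r := by
  induction js with
  | nil => intro r; rfl
  | cons j js ih =>
    intro r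
    simp only [List.foldl_cons, hw j (by simp)]
    exact ih (fun j' hj' => hw j' (List.mem_cons_of_mem _ hj')) _

lemma step_eq (L : List (List Int)) (i : Int) (hi : 1 ≤ i) (hiL : i < (L.length : Int))
    (hrows : ∀ r ∈ L, 4 ≤ r.length) : stepA L i = stepB L i := by
  have hprev_get : PySem.List.pyGetD L (i - 1) [] = L[(i - 1).toNat]'(by omega) :=
    PySem.List.pyGetD_eq_getElem _ _ (by omega) (by omega)
  have hmem : PySem.List.pyGetD L (i - 1) [] ∈ L := hprev_get ▸ List.getElem_mem _
  have hplen : 4 ≤ (PySem.List.pyGetD L (i - 1) []).length := hrows _ hmem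
  rcases hp : PySem.List.pyGetD L (i - 1) [] with _ | ⟨p0, rest⟩
  · rw [hp] at hplen; simp at hplen
  · rw [hp] at hplen
    unfold stepA stepB
    rw [hp]
    rcases hs : (PySem.List.enumerate rest 1).foldl top2step (p0, 0, none) with ⟨b, bi, sec⟩
    have hR : PySem.List.pyRange 0 4 1 = [0, 1, 2, 3] := by decide
    have hL0 : L = PySem.List.pySetD L i (PySem.List.pyGetD L i []) := by
      rw [PySem.List.pySetD_of_nonneg _ _ (by omega),
        PySem.List.pyGetD_eq_getElem _ _ (by omega) (by omega)]
      exact (List.set_getElem_self (by omega)).symm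
    conv_lhs => rw [hL0]
    rw [hR]
    rw [innerA_foldl i L (p0 :: rest) hi hiL hp (by omega) [0, 1, 2, 3]
      (by intro j hj; simp only [List.mem_cons, List.not_mem_nil, or_false] at hj
          have h4 : 4 ≤ (p0 :: rest).length := hplen
          rcases hj with rfl | rfl | rfl | rfl <;> exact ⟨by omega, by omega⟩)]
    have hval : ∀ j ∈ ([0, 1, 2, 3] : List Int),
        (PySem.List.max? ((p0 :: rest).eraseIdx j.toNat) (fun y => y)).getD 0 =
          (if j ≠ bi then b else sec.getD 0) := by
      intro j hj
      simp only [List.mem_cons, List.not_mem_nil, or_false] at hj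
      have hj0 : 0 ≤ j := by rcases hj with rfl | rfl | rfl | rfl <;> omega
      have hjlt : j.toNat < (p0 :: rest).length := by
        rcases hj with rfl | rfl | rfl | rfl <;> omega
      rw [addval p0 rest b bi sec hs (by omega) j.toNat hjlt, Option.getD_some,
        Int.toNat_of_nonneg hj0]
    rw [foldl_row_congr _ _ [0, 1, 2, 3] hval]
    simp only [hs]

lemma stepB_length (L : List (List Int)) (i : Int) : (stepB L i).length = L.length := by
  unfold stepB
  split
  · rfl
  · exact PySem.List.length_pySetD _ _ _

lemma stepB_rows (L : List (List Int)) (i : Int) (hi : 1 ≤ i) (hiL : i < (L.length : Int))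
    (hrows : ∀ r ∈ L, 4 ≤ r.length) : ∀ r ∈ stepB L i, 4 ≤ r.length := by
  unfold stepB
  split
  · exact hrows
  · intro r hr
    rw [PySem.List.pySetD_of_nonneg _ _ (by omega)] at hr
    rcases List.mem_or_eq_of_mem_set hr with hr | rfl
    · exact hrows _ hr
    · rw [foldl_pySetD_length]
      have hrow : PySem.List.pyGetD L i [] = L[i.toNat]'(by omega) :=
        PySem.List.pyGetD_eq_getElem _ _ (by omega) (by omega)
      rw [hrow]
      exact hrows _ (List.getElem_mem _)

lemma outer_eq (n : Int) : ∀ (m : ℕ) (a : Int), 1 ≤ a → (n - a).toNat ≤ m →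
    ∀ L : List (List Int), (L.length : Int) = n → (∀ r ∈ L, 4 ≤ r.length) →
    (PySem.List.pyRange a n 1).foldl stepA L = (PySem.List.pyRange a n 1).foldl stepB L := by
  intro m
  induction m with
  | zero =>
    intro a ha hm L hL hrows
    rw [PySem.List.pyRange_one_eq_nil (by omega)]
    rfl
  | succ m ih =>
    intro a ha hm L hL hrows
    by_cases han : a < n
    · rw [PySem.List.pyRange_one_cons han]
      simp only [List.foldl_cons]
      rw [step_eq L a ha (by omega) hrows]
      have hlen' : (((stepB L a)).length : Int) = n := by rw [stepB_length]; exact hL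
      exact ih (a + 1) (by omega) (by omega) _ hlen'
        (stepB_rows L a ha (by omega) hrows)
    · rw [PySem.List.pyRange_one_eq_nil (by omega)]
      rfl

-- ===== VERDICT (by name: the statement is the Claim_ definition above) =====
theorem solution_spec : Claim_equal_solution := by
  intro land _ hpre
  unfold Spec_solution
  by_cases h2 : 2 ≤ land.length
  · have hrows := hpre.2.2 h2
    rw [solution_eq_stepA, solution_alt_eq_stepB,
      outer_eq (land.length : Int) (land.length) 1 (by omega) (by omega) land rfl hrows]
  · have hn : (land.length : Int) ≤ 1 := by exact_mod_cast Nat.le_of_lt_succ (by omega)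
    rw [solution_eq_stepA, solution_alt_eq_stepB,
      PySem.List.pyRange_one_eq_nil hn]
    rfl
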